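-- pv_equiv track=rewrite | github.com/Griffiniskid/IlyonAI | IlyonAi-Wallet-assistant-main/server/app/agents/crypto_agent.py | _split_connected_wallets
-- ===== SOURCE A (Python) =====
-- def _split_connected_wallets(user_address: str = "", solana_address: str = "") -> tuple[str, str]:
--     evm_wallet = ""
--     sol_wallet = ""
--     for raw in (user_address or "", solana_address or ""):
--         for part in [p.strip() for p in str(raw).split(",") if p.strip()]:
--             if part.startswith("0x") and len(part) == 42 and not evm_wallet:
--                 evm_wallet = part
--             elif not part.startswith("0x") and len(part) >= 32 and not sol_wallet:
--                 sol_wallet = part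
--     return evm_wallet, sol_wallet
-- ===== SOURCE B (Python) =====
-- def _split_connected_wallets(user_address: str = "", solana_address: str = "") -> tuple[str, str]:
--     parts = [p.strip()
--              for raw in (user_address or "", solana_address or "")
--              for p in str(raw).split(",")
--              if p.strip()]
--     evm_wallet = next((p for p in parts if p.startswith("0x") and len(p) == 42), "")
--     sol_wallet = next((p for p in parts if not p.startswith("0x") and len(p) >= 32), "")
--     return evm_wallet, sol_wallet
-- ===== Notes on version B (the rewrite author's own statement) =====
-- stated objective: simpler
-- what changed: Replaces the fused accumulator-flag loop with one flattened list of stripped parts and two independent first-match scans (next over a generator) for the EVM and Solana wallets.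
import Mathlib
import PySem

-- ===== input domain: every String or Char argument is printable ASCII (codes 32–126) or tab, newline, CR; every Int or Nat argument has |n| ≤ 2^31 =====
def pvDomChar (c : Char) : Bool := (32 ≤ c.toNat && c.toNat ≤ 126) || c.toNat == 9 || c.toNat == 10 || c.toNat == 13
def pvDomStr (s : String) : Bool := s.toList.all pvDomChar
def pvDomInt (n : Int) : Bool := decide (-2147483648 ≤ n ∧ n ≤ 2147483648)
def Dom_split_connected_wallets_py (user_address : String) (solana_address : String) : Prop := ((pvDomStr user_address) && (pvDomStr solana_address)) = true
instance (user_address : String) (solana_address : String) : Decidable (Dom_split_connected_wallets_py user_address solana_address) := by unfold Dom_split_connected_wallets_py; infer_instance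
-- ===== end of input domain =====

-- B replaces A's fused accumulator-flag loop with a flattened parts list and two independent first-match scans (simpler decomposition).


-- ===== PORT A =====
-- shared branch conditions of both Pythons:
-- part.startswith("0x") and len(part) == 42   /   not part.startswith("0x") and len(part) >= 32
def pvEvmP (p : String) : Bool := PySem.Str.startswith p "0x" && (PySem.Str.len p == 42)
def pvSolP (p : String) : Bool := !PySem.Str.startswith p "0x" && decide (32 ≤ PySem.Str.len p)

-- [p.strip() for p in raw.split(",") if p.strip()]  (split? is some: the separator "," is nonempty)
def pvParts (raw : String) : List String :=
  ((PySem.Str.split? raw ",").getD []).filterMap (fun p =>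
    let q := PySem.Str.strip p
    if q ≠ "" then some q else none)

-- the body of A's inner loop: branches in A's order, guarded by the accumulator-empty flags
def pvStepA (st : String × String) (part : String) : String × String :=
  if pvEvmP part && (st.1 == "") then (part, st.2)
  else if pvSolP part && (st.2 == "") then (st.1, part)
  else st

def split_connected_wallets_py (user_address : String) (solana_address : String) : String × String :=
  -- for raw in (user_address or "", solana_address or ""): note `s or ""` = s for strings
  let st1 := (pvParts user_address).foldl pvStepA ("", "")
  (pvParts solana_address).foldl pvStepA st1

-- ===== PORT B =====
def split_connected_wallets_py_alt (user_address : String) (solana_address : String) : String × String :=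
  let parts := [user_address, solana_address].flatMap pvParts
  let evm := (parts.find? pvEvmP).getD ""
  let sol := (parts.find? pvSolP).getD ""
  (evm, sol)

-- ===== PRECONDITION & SPEC =====
def Spec_split_connected_wallets_py (user_address : String) (solana_address : String) (out : String × String) : Prop := out = split_connected_wallets_py_alt user_address solana_address
instance (user_address : String) (solana_address : String) (out : String × String) : Decidable (Spec_split_connected_wallets_py user_address solana_address out) := by unfold Spec_split_connected_wallets_py; infer_instance

-- ===== CLAIM (what is proved, stated in full; the proofs are below) =====
def Claim_equal_split_connected_wallets_py : Prop := ∀ (user_address : String) (solana_address : String), Dom_split_connected_wallets_py user_address solana_address → Spec_split_connected_wallets_py user_address solana_address (split_connected_wallets_py user_address solana_address)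

-- ===== LEMMAS AND PROOFS =====

theorem pvEvmP_ne_empty {p : String} (h : pvEvmP p = true) : p ≠ "" := by
  rintro rfl; revert h; decide

theorem pvSolP_ne_empty {p : String} (h : pvSolP p = true) : p ≠ "" := by
  rintro rfl; revert h; decide

theorem pvEvmP_sol {p : String} (h : pvEvmP p = true) : pvSolP p = false := by
  simp [pvEvmP, pvSolP] at *
  simp [h.1]

theorem pvFold_eq (ps : List String) : ∀ (e s : String),
    ps.foldl pvStepA (e, s) =
      ((if e = "" then (ps.find? pvEvmP).getD "" else e),
       (if s = "" then (ps.find? pvSolP).getD "" else s)) := by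
  induction ps with
  | nil => intro e s; simp
  | cons p ps ih =>
    intro e s
    rw [List.foldl_cons]
    by_cases hev : pvEvmP p = true
    · have hsol : pvSolP p = false := pvEvmP_sol hev
      by_cases he : e = ""
      · subst he
        rw [show pvStepA ("", s) p = (p, s) by simp [pvStepA, hev], ih,
          List.find?_cons_of_pos hev,
          show List.find? pvSolP (p :: ps) = List.find? pvSolP ps from
            List.find?_cons_of_neg (by simp [hsol])]
        simp [pvEvmP_ne_empty hev]
      · rw [show pvStepA (e, s) p = (e, s) by simp [pvStepA, he, hsol], ih,
          show List.find? pvSolP (p :: ps) = List.find? pvSolP ps from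
            List.find?_cons_of_neg (by simp [hsol])]
        simp [he]
    · have hev' : pvEvmP p = false := by simpa using hev
      by_cases hso : pvSolP p = true
      · by_cases hs : s = ""
        · subst hs
          rw [show pvStepA (e, "") p = (e, p) by simp [pvStepA, hev', hso], ih,
            show List.find? pvEvmP (p :: ps) = List.find? pvEvmP ps from
              List.find?_cons_of_neg (by simp [hev']),
            List.find?_cons_of_pos hso]
          simp [pvSolP_ne_empty hso]
        · rw [show pvStepA (e, s) p = (e, s) by simp [pvStepA, hev', hs], ih,
            show List.find? pvEvmP (p :: ps) = List.find? pvEvmP ps from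
              List.find?_cons_of_neg (by simp [hev'])]
          simp [hs]
      · have hso' : pvSolP p = false := by simpa using hso
        rw [show pvStepA (e, s) p = (e, s) by simp [pvStepA, hev', hso'], ih,
          show List.find? pvEvmP (p :: ps) = List.find? pvEvmP ps from
            List.find?_cons_of_neg (by simp [hev']),
          show List.find? pvSolP (p :: ps) = List.find? pvSolP ps from
            List.find?_cons_of_neg (by simp [hso'])]

-- ===== VERDICT (by name: the statement is the Claim_ definition above) =====
theorem split_connected_wallets_py_spec : Claim_equal_split_connected_wallets_py := by
  intro u s _
  show split_connected_wallets_py u s = split_connected_wallets_py_alt u s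
  simp only [split_connected_wallets_py, split_connected_wallets_py_alt,
    List.flatMap_cons, List.flatMap_nil, List.append_nil]
  rw [← List.foldl_append, pvFold_eq]
  simp
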